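-- pv_equiv track=rewrite | github.com/1n-finity/lab_shortcuts | gpu_monitor.py | parse_nvuse_output
-- ===== SOURCE A (Python) =====
-- def parse_nvuse_output(output):
--     """Parses memory availability and active jobs from nvuse output."""
--     available_mem = "Memory info not found"
--     current_jobs = {}
--
--     lines = output.strip().split('\n')
--     parsing_processes = False
--
--     for line in lines:
--         line = line.strip()
--         if not line:
--             continue
--
--         if "=== Active Processes ===" in line:
--             parsing_processes = True
--             continue
--
--         if not parsing_processes:
--             parts = line.split()
--             if len(parts) >= 3 and parts[0].isdigit():
--                 gpu_id = parts[0]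
--                 total_mem = parts[1]
--                 free_mem = parts[2]
--                 mem_str = f"GPU {gpu_id}: **{free_mem} Free** / {total_mem} Total"
--
--                 if available_mem == "Memory info not found":
--                     available_mem = mem_str
--                 else:
--                     available_mem += f"\n> {mem_str}"
--         else:
--             if line.startswith("PID") or line.startswith("---"):
--                 continue
--
--             parts = line.split()
--             if len(parts) >= 4 and parts[0].isdigit():
--                 pid = parts[0]
--                 user = parts[1]
--                 used_mem = parts[2]
--                 command = " ".join(parts[3:])
--
--                 current_jobs[pid] = {
--                     "user": user,
--                     "details": f"Mem: {used_mem} | Cmd: {command}"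
--                 }
--
--     return available_mem, current_jobs
-- ===== SOURCE B (Python) =====
-- def parse_nvuse_output(output):
--     """Parses memory availability and active jobs from nvuse output."""
--     marker = "=== Active Processes ==="
--     lines = [l for l in (raw.strip() for raw in output.strip().split('\n')) if l]
--     idx = next((i for i, l in enumerate(lines) if marker in l), len(lines))
--     mem_lines = lines[:idx]
--     proc_lines = [l for l in lines[idx + 1:] if marker not in l]
--
--     mem_strs = [f"GPU {p[0]}: **{p[2]} Free** / {p[1]} Total"
--                 for p in (l.split() for l in mem_lines)
--                 if len(p) >= 3 and p[0].isdigit()]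
--     available_mem = "\n> ".join(mem_strs) if mem_strs else "Memory info not found"
--
--     current_jobs = {}
--     for line in proc_lines:
--         if line.startswith("PID") or line.startswith("---"):
--             continue
--         p = line.split()
--         if len(p) >= 4 and p[0].isdigit():
--             current_jobs[p[0]] = {"user": p[1], "details": f"Mem: {p[2]} | Cmd: {' '.join(p[3:])}"}
--     return available_mem, current_jobs
-- ===== Notes on version B (the rewrite author's own statement) =====
-- stated objective: simpler
-- what changed: B replaces A's single stateful loop (parsing flag + sentinel string accumulation) by splitting the stripped non-empty lines at the first '=== Active Processes ===' marker and handling the memory section (collect-then-join) and the process section in two independent passes.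
import Mathlib
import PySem

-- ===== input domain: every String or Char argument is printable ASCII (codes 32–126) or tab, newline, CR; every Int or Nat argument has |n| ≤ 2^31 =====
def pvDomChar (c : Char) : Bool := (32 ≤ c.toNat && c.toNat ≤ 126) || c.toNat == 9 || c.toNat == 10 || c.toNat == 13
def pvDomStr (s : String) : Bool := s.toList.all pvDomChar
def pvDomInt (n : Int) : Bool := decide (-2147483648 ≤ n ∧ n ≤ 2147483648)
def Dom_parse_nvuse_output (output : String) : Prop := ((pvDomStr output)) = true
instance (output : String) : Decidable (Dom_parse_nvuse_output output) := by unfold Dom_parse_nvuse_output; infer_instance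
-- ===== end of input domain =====

-- B splits the stripped non-empty lines at the first '=== Active Processes ===' marker and
-- processes the memory section and the process section in two separate passes (join of a
-- collected list instead of A's stateful sentinel/flag accumulation); same return value.

-- shared formatting helpers (both Pythons build these exact strings)
def pvMarker : String := "=== Active Processes ==="
def pvSentinel : String := "Memory info not found"

def pvMemOk (parts : List String) : Bool :=
  decide (3 ≤ parts.length) && PySem.Str.strIsdigit (parts.getD 0 "")

def pvMemFmt (parts : List String) : String :=
  "GPU " ++ parts.getD 0 "" ++ ": **" ++ parts.getD 2 "" ++ " Free** / " ++ parts.getD 1 "" ++ " Total"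

def pvJobOk (parts : List String) : Bool :=
  decide (4 ≤ parts.length) && PySem.Str.strIsdigit (parts.getD 0 "")

def pvJobVal (parts : List String) : List (String × String) :=
  [("user", parts.getD 1 ""),
   ("details", "Mem: " ++ parts.getD 2 "" ++ " | Cmd: " ++ PySem.Str.join " " (parts.drop 3))]

-- ===== PORT A =====
-- A's loop body (state = (available_mem, current_jobs, parsing_processes))
def pvStepCore (st : String × PySem.Dict String (List (String × String)) × Bool)
    (line : String) : String × PySem.Dict String (List (String × String)) × Bool :=
  if PySem.Str.isIn pvMarker line then (st.1, st.2.1, true)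
  else if st.2.2 = false then
    if pvMemOk (PySem.Str.split₀ line) then
      if st.1 = pvSentinel then (pvMemFmt (PySem.Str.split₀ line), st.2.1, st.2.2)
      else (st.1 ++ "\n> " ++ pvMemFmt (PySem.Str.split₀ line), st.2.1, st.2.2)
    else st
  else
    if PySem.Str.startswith line "PID" || PySem.Str.startswith line "---" then st
    else
      if pvJobOk (PySem.Str.split₀ line) then
        (st.1, PySem.Dict.insert st.2.1 ((PySem.Str.split₀ line).getD 0 "") (pvJobVal (PySem.Str.split₀ line)), st.2.2)
      else st

def pvStepA (st : String × PySem.Dict String (List (String × String)) × Bool)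
    (raw : String) : String × PySem.Dict String (List (String × String)) × Bool :=
  let line := PySem.Str.strip raw
  if line = "" then st else pvStepCore st line

def parse_nvuse_output (output : String) : String × (List (String × List (String × String))) :=
  let lines := (PySem.Str.split? (PySem.Str.strip output) "\n").getD []
  let r := lines.foldl pvStepA (pvSentinel, PySem.Dict.mk [], false)
  (r.1, r.2.1.items)

-- ===== PORT B =====
def pvMem? (l : String) : Option String :=
  if pvMemOk (PySem.Str.split₀ l) then some (pvMemFmt (PySem.Str.split₀ l)) else none

def pvProcStep (jobs : PySem.Dict String (List (String × String))) (line : String) :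
    PySem.Dict String (List (String × String)) :=
  if PySem.Str.startswith line "PID" || PySem.Str.startswith line "---" then jobs
  else
    if pvJobOk (PySem.Str.split₀ line) then
      PySem.Dict.insert jobs ((PySem.Str.split₀ line).getD 0 "") (pvJobVal (PySem.Str.split₀ line))
    else jobs

def parse_nvuse_output_alt (output : String) : String × (List (String × List (String × String))) :=
  let lines := ((((PySem.Str.split? (PySem.Str.strip output) "\n").getD []).map
      PySem.Str.strip).filter (fun l => decide (l ≠ "")))
  let memLines := lines.takeWhile (fun l => !(PySem.Str.isIn pvMarker l))
  let procLines := ((lines.dropWhile (fun l => !(PySem.Str.isIn pvMarker l))).drop 1).filter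
      (fun l => !(PySem.Str.isIn pvMarker l))
  let memStrs := memLines.filterMap pvMem?
  let available := if memStrs = [] then pvSentinel else PySem.Str.join "\n> " memStrs
  (available, (procLines.foldl pvProcStep (PySem.Dict.mk [])).items)

-- ===== PRECONDITION & SPEC =====
def Spec_parse_nvuse_output (output : String) (out : String × (List (String × List (String × String)))) : Prop := out = parse_nvuse_output_alt output
instance (output : String) (out : String × (List (String × List (String × String)))) : Decidable (Spec_parse_nvuse_output output out) := by unfold Spec_parse_nvuse_output; infer_instance

-- ===== CLAIM (what is proved, stated in full; the proofs are below) =====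
def Claim_equal_parse_nvuse_output : Prop := ∀ (output : String), Dom_parse_nvuse_output output → Spec_parse_nvuse_output output (parse_nvuse_output output)

-- ===== LEMMAS AND PROOFS =====

-- A's memory-phase accumulator, isolated
def pvMemStep (mem : String) (l : String) : String :=
  match pvMem? l with
  | some ms => if mem = pvSentinel then ms else mem ++ "\n> " ++ ms
  | none => mem

theorem pv_foldA_strip (raw : List String) (st : String × PySem.Dict String (List (String × String)) × Bool) :
    raw.foldl pvStepA st =
      ((raw.map PySem.Str.strip).filter (fun l => decide (l ≠ ""))).foldl pvStepCore st := by
  rw [← PySem.List.foldl_ite_eq_foldl_filter (p := fun l => l ≠ "") pvStepCore, List.foldl_map]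
  apply PySem.List.foldl_congr_mem
  intro acc x _
  by_cases h : PySem.Str.strip x = "" <;> simp [pvStepA, h]

theorem pv_mem_phase (M : List String) (h : ∀ l ∈ M, PySem.Str.isIn pvMarker l = false)
    (mem : String) (jobs : PySem.Dict String (List (String × String))) :
    M.foldl pvStepCore (mem, jobs, false) = (M.foldl pvMemStep mem, jobs, false) := by
  induction M generalizing mem with
  | nil => rfl
  | cons l M ih =>
    have hl : PySem.Str.isIn pvMarker l = false := h l (List.mem_cons_self ..)
    have hrest : ∀ x ∈ M, PySem.Str.isIn pvMarker x = false := fun x hx => h x (List.mem_cons_of_mem _ hx)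
    have hstep : pvStepCore (mem, jobs, false) l = (pvMemStep mem l, jobs, false) := by
      simp only [pvStepCore, pvMemStep, pvMem?, hl]
      by_cases hok : pvMemOk (PySem.Str.split₀ l) <;> by_cases hs : mem = pvSentinel <;>
        simp [hok, hs]
    simp only [List.foldl_cons, hstep, ih hrest]

theorem pv_proc_phase (R : List String) (mem : String)
    (jobs : PySem.Dict String (List (String × String))) :
    R.foldl pvStepCore (mem, jobs, true) =
      (mem, (R.filter (fun l => !(PySem.Str.isIn pvMarker l))).foldl pvProcStep jobs, true) := by
  induction R generalizing jobs with
  | nil => rfl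
  | cons l R ih =>
    by_cases hl : PySem.Str.isIn pvMarker l
    · have hstep : pvStepCore (mem, jobs, true) l = (mem, jobs, true) := by
        unfold pvStepCore
        rw [if_pos hl]
      simp only [List.foldl_cons, hstep, List.filter_cons, hl]
      simpa using ih jobs
    · have hstep : pvStepCore (mem, jobs, true) l = (mem, pvProcStep jobs l, true) := by
        unfold pvStepCore pvProcStep
        rw [if_neg hl, if_neg (by simp : ¬((mem, jobs, true).2.2 = false))]
        split_ifs <;> rfl
      simp only [List.foldl_cons, hstep, List.filter_cons]
      simp only [hl, Bool.not_false, if_pos]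
      exact ih (pvProcStep jobs l)

-- strings produced by pvMem? start with 'G', hence differ from the sentinel
theorem pv_mem?_head {l ms : String} (h : pvMem? l = some ms) :
    ms.toList.head? = some 'G' := by
  simp only [pvMem?] at h
  by_cases hok : pvMemOk (PySem.Str.split₀ l)
  · simp only [hok, if_pos, Option.some.injEq] at h
    subst h
    simp [pvMemFmt, String.toList_append]
  · simp [hok] at h

theorem pv_head_ne_sentinel {s : String} (h : s.toList.head? = some 'G') : s ≠ pvSentinel := by
  intro e; subst e
  have : pvSentinel.toList.head? = some 'M' := by decide
  rw [this] at h; simp at h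

theorem pv_gstr_append (a b : String) (h : a.toList.head? = some 'G') :
    (a ++ b).toList.head? = some 'G' := by
  rw [String.toList_append, List.head?_append, h]; rfl

-- ''.join written as a left fold
theorem pv_foldl_append_pull (t : List String) (a b : String) :
    t.foldl (fun u s => u ++ "\n> " ++ s) (a ++ b) =
      a ++ t.foldl (fun u s => u ++ "\n> " ++ s) b := by
  induction t generalizing b with
  | nil => rfl
  | cons c t ih =>
    simp only [List.foldl_cons]
    have h1 : a ++ b ++ "\n> " ++ c = a ++ (b ++ "\n> " ++ c) := by
      simp only [String.append_assoc]
    rw [h1]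
    exact ih (b ++ "\n> " ++ c)

theorem pv_join_cons (x : String) (xs : List String) :
    PySem.Str.join "\n> " (x :: xs) = xs.foldl (fun u s => u ++ "\n> " ++ s) x := by
  induction xs generalizing x with
  | nil =>
    rw [← String.toList_inj, PySem.Str.toList_join]
    simp [PySem.Chars.join_singleton]
  | cons s t ih =>
    have hcc : PySem.Str.join "\n> " (x :: s :: t) = x ++ "\n> " ++ PySem.Str.join "\n> " (s :: t) := by
      rw [← String.toList_inj, PySem.Str.toList_join]
      simp only [List.map_cons, PySem.Chars.join_cons_cons, String.toList_append,
        PySem.Str.toList_join, List.map_cons]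
    rw [hcc, ih s, List.foldl_cons]
    exact (pv_foldl_append_pull t (x ++ "\n> ") s).symm

theorem pv_memfold_from (M : List String) (cur : String) (h : cur.toList.head? = some 'G') :
    M.foldl pvMemStep cur = (M.filterMap pvMem?).foldl (fun u s => u ++ "\n> " ++ s) cur := by
  induction M generalizing cur with
  | nil => rfl
  | cons l M ih =>
    simp only [List.foldl_cons, List.filterMap_cons]
    cases hm : pvMem? l with
    | none => simp only [pvMemStep, hm]; exact ih cur h
    | some ms =>
      have hne : cur ≠ pvSentinel := pv_head_ne_sentinel h
      have hstep : pvMemStep cur l = cur ++ "\n> " ++ ms := by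
        simp [pvMemStep, hm, hne]
      rw [hstep, List.foldl_cons]
      exact ih _ (pv_gstr_append _ _ (pv_gstr_append _ _ h))

theorem pv_memfold (M : List String) :
    M.foldl pvMemStep pvSentinel =
      (if M.filterMap pvMem? = [] then pvSentinel
       else PySem.Str.join "\n> " (M.filterMap pvMem?)) := by
  induction M with
  | nil => rfl
  | cons l M ih =>
    simp only [List.foldl_cons, List.filterMap_cons]
    cases hm : pvMem? l with
    | none =>
      have hstep : pvMemStep pvSentinel l = pvSentinel := by simp [pvMemStep, hm]
      simpa [hstep] using ih
    | some ms =>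
      have hstep : pvMemStep pvSentinel l = ms := by simp [pvMemStep, hm]
      rw [hstep, pv_memfold_from M ms (pv_mem?_head hm), pv_join_cons]
      simp

-- ===== VERDICT (by name: the statement is the Claim_ definition above) =====
theorem parse_nvuse_output_spec : Claim_equal_parse_nvuse_output := by
  intro output _
  unfold Spec_parse_nvuse_output parse_nvuse_output parse_nvuse_output_alt
  simp only [pv_foldA_strip]
  set L := ((((PySem.Str.split? (PySem.Str.strip output) "\n").getD []).map
      PySem.Str.strip).filter (fun l => decide (l ≠ ""))) with hL
  have hsplit : L.takeWhile (fun l => !(PySem.Str.isIn pvMarker l)) ++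
      L.dropWhile (fun l => !(PySem.Str.isIn pvMarker l)) = L := List.takeWhile_append_dropWhile
  have hmemM : ∀ l ∈ L.takeWhile (fun l => !(PySem.Str.isIn pvMarker l)),
      PySem.Str.isIn pvMarker l = false := by
    intro l hl
    have := List.mem_takeWhile_imp hl
    simpa using this
  have hAfold : L.foldl pvStepCore (pvSentinel, PySem.Dict.mk [], false) =
      (L.dropWhile (fun l => !(PySem.Str.isIn pvMarker l))).foldl pvStepCore
        ((L.takeWhile (fun l => !(PySem.Str.isIn pvMarker l))).foldl pvStepCore
          (pvSentinel, PySem.Dict.mk [], false)) := by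
    conv_lhs => rw [← hsplit]
    rw [List.foldl_append]
  rw [hAfold, pv_mem_phase _ hmemM _ _]
  cases hdw : L.dropWhile (fun l => !(PySem.Str.isIn pvMarker l)) with
  | nil =>
    simp only [List.foldl_nil, List.drop_nil, List.filter_nil, List.foldl_nil]
    rw [pv_memfold]
  | cons r R =>
    have hr : PySem.Str.isIn pvMarker r = true := by
      have h1 : L.dropWhile (fun l => !(PySem.Str.isIn pvMarker l)) ≠ [] := by
        rw [hdw]; exact List.cons_ne_nil _ _
      have := List.head_dropWhile_not (p := fun l => !(PySem.Str.isIn pvMarker l)) h1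
      simp only [hdw, List.head_cons, Bool.not_eq_false'] at this
      exact this
    have hstep : pvStepCore
        ((L.takeWhile (fun l => !(PySem.Str.isIn pvMarker l))).foldl pvMemStep pvSentinel,
          PySem.Dict.mk [], false) r =
        ((L.takeWhile (fun l => !(PySem.Str.isIn pvMarker l))).foldl pvMemStep pvSentinel,
          PySem.Dict.mk [], true) := by
      unfold pvStepCore
      rw [if_pos hr]
    simp only [List.foldl_cons, hstep, pv_proc_phase, List.drop_succ_cons, List.drop_zero]
    rw [pv_memfold]
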